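-- pv_equiv track=rewrite | github.com/981377660LMT/algorithm-study | 11_动态规划/dp分类/区间dp/dfs/回文/中心扩展法求回文子串/2472. 不重叠回文子字符串的最大数目/2472. 不重叠回文子字符串的最大数目.py | maxPalindromes1
-- ===== SOURCE A (Python) =====
-- def maxPalindromes1(s: str, k: int) -> int:
--     """O(n^2)dp"""
--
--     def expand(left: int, right: int) -> None:
--         """中心扩展法求s[left:right+1]是否为回文串"""
--         while left >= 0 and right < len(s) and s[left] == s[right]:
--             if right - left + 1 >= k:
--                 isPalindrome[left][right] = True
--             left -= 1
--             right += 1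
--
--     n = len(s)
--     isPalindrome = [[False] * n for _ in range(n)]  # dp[i][j] 表示 s[i:j+1] 是否是回文串
--     for i in range(n):
--         expand(i, i)
--         expand(i, i + 1)
--
--     # 选出最多数量的区间，使得它们互不重叠 (dp)
--     dp = [0] * (n + 1)  # 第i个字符结尾的最多不重叠回文子串数目
--     for i in range(1, n + 1):
--         dp[i] = dp[i - 1]  # jump
--         for j in range(i - k + 1):  # not jump
--             if isPalindrome[j][i - 1]:
--                 dp[i] = max(dp[i], dp[j] + 1)
--     return dp[-1]
-- ===== SOURCE B (Python) =====
-- def maxPalindromes1(s: str, k: int) -> int: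
--     """One pass: any palindrome of length >= k contains a palindrome of length
--     exactly k or k+1 ending no later, so the DP only needs the two windows
--     s[i-k:i] and s[i-k-1:i]. No n*n table, no inner scan."""
--     n = len(s)
--     dp = [0] * (n + 1)
--     for i in range(1, n + 1):
--         best = dp[i - 1]
--         if i >= k:
--             w = s[i - k:i]
--             if w == w[::-1]:
--                 best = max(best, dp[i - k] + 1)
--         if i >= k + 1:
--             w = s[i - k - 1:i]
--             if w == w[::-1]:
--                 best = max(best, dp[i - k - 1] + 1)
--         dp[i] = best
--     return dp[n]
-- ===== Notes on version B (the rewrite author's own statement) =====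
-- stated objective: faster
-- what changed: Replaces the n×n center-expansion palindrome table plus an inner j-scan DP by a single left-to-right DP that only tests the two windows of length k and k+1 ending at each position (any palindrome of length ≥ k contains one of length k or k+1 inside it, so longer palindromes never improve the DP).
import Mathlib
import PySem

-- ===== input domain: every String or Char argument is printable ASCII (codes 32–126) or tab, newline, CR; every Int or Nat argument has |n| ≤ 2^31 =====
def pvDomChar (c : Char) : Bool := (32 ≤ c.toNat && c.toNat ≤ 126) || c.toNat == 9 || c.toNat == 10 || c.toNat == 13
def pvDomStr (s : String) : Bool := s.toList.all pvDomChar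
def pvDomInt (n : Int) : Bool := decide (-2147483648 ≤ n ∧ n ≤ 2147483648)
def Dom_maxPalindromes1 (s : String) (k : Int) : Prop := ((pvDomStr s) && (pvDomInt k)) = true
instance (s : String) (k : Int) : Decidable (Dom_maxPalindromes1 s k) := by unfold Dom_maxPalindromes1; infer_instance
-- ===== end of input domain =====

-- B replaces A's n×n center-expansion palindrome table + inner j-scan DP by a single
-- left-to-right DP testing only the length-k and length-(k+1) windows (faster).


-- ===== PORT A =====
-- The boolean matrix `isPalindrome` (allocated all-False, written only with True) is
-- represented by the list of its True cells: the write `isPalindrome[left][right] = True`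
-- conses `(left, right)`, the read `isPalindrome[j][i-1]` is a membership test — exact.
-- The while loop of `expand` is ported with fuel `len(s)+1`, an upper bound on its
-- iteration count (each step needs `left ≥ 0` and `left` starts at `i < len(s)` and decreases).
def pvExpand (cs : List Char) (k : Int) : Nat → Int → Int → List (Int × Int) → List (Int × Int)
  | 0, _, _, t => t
  | fuel + 1, left, right, t =>
    if 0 ≤ left ∧ right < (cs.length : Int) ∧
        cs.getD left.toNat ' ' = cs.getD right.toNat ' ' then
      pvExpand cs k fuel (left - 1) (right + 1)
        (if k ≤ right - left + 1 then (left, right) :: t else t)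
    else t

def pvMarks (cs : List Char) (k : Int) : List (Int × Int) :=
  (List.range cs.length).foldl
    (fun t (i : Nat) => pvExpand cs k (cs.length + 1) (i : Int) ((i : Int) + 1)
                  (pvExpand cs k (cs.length + 1) (i : Int) (i : Int) t)) []

-- dp[i] = dp[i-1], then the j-loop max-updates it: a fold with that initial value.
def pvInnerA (k : Int) (marks : List (Int × Int)) (dp : List Int) (i : Nat) : Int :=
  (List.range ((i : Int) - k + 1).toNat).foldl
    (fun acc (j : Nat) =>
      if ((j : Int), (i : Int) - 1) ∈ marks then max acc (dp.getD j 0 + 1) else acc)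
    (dp.getD (i - 1) 0)

-- `dp = [0] * (n + 1)` filled strictly left to right is ported as the growing list
-- [dp[0], …, dp[i]]; only already-written entries are ever read — exact.
def maxPalindromes1 (s : String) (k : Int) : Int :=
  let cs := s.toList
  let n := cs.length
  let marks := pvMarks cs k
  let dp := (List.range n).foldl (fun dp t => dp ++ [pvInnerA k marks dp (t + 1)]) [0]
  PySem.List.pyGetD dp (-1) 0

-- ===== PORT B =====
-- `w[::-1]` is `w.reverse` (PySem.List.slice?_none_none_neg_one).
def pvStepB (cs : List Char) (k : Int) (dp : List Int) (i : Nat) : Int :=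
  let best := dp.getD (i - 1) 0
  let best := if k ≤ (i : Int) then
      let w := PySem.List.slice cs (some ((i : Int) - k)) (some (i : Int))
      if w = w.reverse then max best (dp.getD ((i : Int) - k).toNat 0 + 1) else best
    else best
  if k + 1 ≤ (i : Int) then
    let w := PySem.List.slice cs (some ((i : Int) - k - 1)) (some (i : Int))
    if w = w.reverse then max best (dp.getD ((i : Int) - k - 1).toNat 0 + 1) else best
  else best

def maxPalindromes1_alt (s : String) (k : Int) : Int :=
  let cs := s.toList
  let n := cs.length
  let dp := (List.range n).foldl (fun dp t => dp ++ [pvStepB cs k dp (t + 1)]) [0]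
  dp.getD n 0

-- ===== PRECONDITION & SPEC =====
-- Pre_ excludes k ≤ 0 with a nonempty s: there A raises IndexError (the inner j-loop
-- reads isPalindrome[j] at j ≥ n). On the empty string A returns 0 for every k.
def Pre_maxPalindromes1 (s : String) (k : Int) : Prop := 1 ≤ k ∨ s.toList.length = 0
instance (s : String) (k : Int) : Decidable (Pre_maxPalindromes1 s k) := by
  unfold Pre_maxPalindromes1; infer_instance

def pvWitness_maxPalindromes1 : String × Int := ("abaccd", 3)

def Spec_maxPalindromes1 (s : String) (k : Int) (out : Int) : Prop := out = maxPalindromes1_alt s k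
instance (s : String) (k : Int) (out : Int) : Decidable (Spec_maxPalindromes1 s k out) := by
  unfold Spec_maxPalindromes1; infer_instance

-- ===== CLAIM (what is proved, stated in full; the proofs are below) =====
def Claim_equal_maxPalindromes1 : Prop := ∀ (s : String) (k : Int), Dom_maxPalindromes1 s k → Pre_maxPalindromes1 s k → Spec_maxPalindromes1 s k (maxPalindromes1 s k)

-- ===== LEMMAS AND PROOFS =====

-- ---- generic max-fold with a filter ----
theorem pvFoldMax_ge_init {q : Nat → Prop} [DecidablePred q] (g : Nat → Int) (l : List Nat)
    (init : Int) : init ≤ l.foldl (fun acc j => if q j then max acc (g j) else acc) init := by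
  induction l generalizing init with
  | nil => simp
  | cons a l ih =>
    refine le_trans ?_ (ih _)
    by_cases h : q a <;> simp [h]

theorem pvFoldMax_ge {q : Nat → Prop} [DecidablePred q] (g : Nat → Int) (l : List Nat)
    (init : Int) {j : Nat} (hj : j ∈ l) (hq : q j) :
    g j ≤ l.foldl (fun acc j => if q j then max acc (g j) else acc) init := by
  induction l generalizing init with
  | nil => simp at hj
  | cons a l ih =>
    rcases List.mem_cons.mp hj with rfl | hj
    · refine le_trans ?_ (pvFoldMax_ge_init g l _)
      simp [hq]
    · exact ih _ hj

theorem pvFoldMax_le {q : Nat → Prop} [DecidablePred q] (g : Nat → Int) (l : List Nat)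
    (init X : Int) (h0 : init ≤ X) (h : ∀ j ∈ l, q j → g j ≤ X) :
    l.foldl (fun acc j => if q j then max acc (g j) else acc) init ≤ X := by
  induction l generalizing init with
  | nil => simpa
  | cons a l ih =>
    refine ih _ ?_ (fun j hj hq => h j (List.mem_cons_of_mem _ hj) hq)
    by_cases hq : q a
    · simp [hq, h0, h a (List.mem_cons_self) hq]
    · simpa [hq]

-- ---- palindrome predicate on index pairs ----
def PvPal (cs : List Char) (l r : Nat) : Prop :=
  ∀ d : Nat, l + d ≤ r → cs.getD (l + d) ' ' = cs.getD (r - d) ' '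

-- ---- characterization of pvExpand ----
def pvCond (cs : List Char) (l r : Int) (e : Nat) : Prop :=
  0 ≤ l - e ∧ r + e < (cs.length : Int) ∧ cs.getD (l - e).toNat ' ' = cs.getD (r + e).toNat ' '

theorem pvCond_shift (cs : List Char) (l r : Int) (e : Nat) :
    pvCond cs (l - 1) (r + 1) e ↔ pvCond cs l r (e + 1) := by
  have h1 : l - 1 - (e : Int) = l - ((e + 1 : Nat) : Int) := by push_cast; ring
  have h2 : r + 1 + (e : Int) = r + ((e + 1 : Nat) : Int) := by push_cast; ring
  simp only [pvCond, h1, h2]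

theorem pvCond_zero (cs : List Char) (l r : Int) :
    pvCond cs l r 0 ↔
      (0 ≤ l ∧ r < (cs.length : Int) ∧ cs.getD l.toNat ' ' = cs.getD r.toNat ' ') := by
  simp [pvCond]

theorem pvExpand_mem (cs : List Char) (k : Int) (fuel : Nat) (l r : Int)
    (t : List (Int × Int)) (x : Int × Int) :
    x ∈ pvExpand cs k fuel l r t ↔
      x ∈ t ∨ ∃ d : Nat, d < fuel ∧ (∀ e : Nat, e ≤ d → pvCond cs l r e) ∧
        x = (l - d, r + d) ∧ k ≤ (r + d) - (l - d) + 1 := by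
  induction fuel generalizing l r t with
  | zero => simp [pvExpand]
  | succ fuel ih =>
    rw [pvExpand]
    by_cases hg : 0 ≤ l ∧ r < (cs.length : Int) ∧ cs.getD l.toNat ' ' = cs.getD r.toNat ' '
    · rw [if_pos hg, ih]
      constructor
      · rintro (ht | ⟨d, hdf, hc, hx, hkb⟩)
        · by_cases hk' : k ≤ r - l + 1
          · rw [if_pos hk'] at ht
            rcases List.mem_cons.mp ht with rfl | ht
            · right
              refine ⟨0, by omega, ?_, by simp, by simpa using hk'⟩
              intro e he
              have : e = 0 := by omega
              subst this
              exact (pvCond_zero cs l r).mpr hg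
            · left; exact ht
          · rw [if_neg hk'] at ht; left; exact ht
        · right
          refine ⟨d + 1, by omega, ?_, ?_, ?_⟩
          · intro e he
            rcases Nat.eq_zero_or_pos e with rfl | he0
            · exact (pvCond_zero cs l r).mpr hg
            · obtain ⟨e', rfl⟩ : ∃ e', e = e' + 1 := ⟨e - 1, by omega⟩
              exact (pvCond_shift cs l r e').mp (hc e' (by omega))
          · rw [hx, Prod.mk.injEq]
            constructor <;> push_cast <;> ring
          · push_cast at hkb ⊢; omega
      · rintro (ht | ⟨d, hdf, hc, hx, hkb⟩)
        · left
          by_cases hk' : k ≤ r - l + 1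
          · rw [if_pos hk']; exact List.mem_cons_of_mem _ ht
          · rw [if_neg hk']; exact ht
        · rcases Nat.eq_zero_or_pos d with rfl | hd0
          · left
            have hkb' : k ≤ r - l + 1 := by push_cast at hkb; omega
            rw [if_pos hkb']
            simp only [Nat.cast_zero, sub_zero, add_zero] at hx
            rw [hx]
            exact List.mem_cons_self
          · right
            obtain ⟨d', rfl⟩ : ∃ d', d = d' + 1 := ⟨d - 1, by omega⟩
            refine ⟨d', by omega, ?_, ?_, ?_⟩
            · intro e he
              exact (pvCond_shift cs l r e).mpr (hc (e + 1) (by omega))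
            · rw [hx, Prod.mk.injEq]
              constructor <;> push_cast <;> ring
            · push_cast at hkb ⊢; omega
    · rw [if_neg hg]
      constructor
      · intro ht; left; exact ht
      · rintro (ht | ⟨d, hdf, hc, hx, hkb⟩)
        · exact ht
        · exact absurd ((pvCond_zero cs l r).mp (hc 0 (by omega))) hg

def pvAdded (cs : List Char) (k : Int) (l r : Int) (x : Int × Int) : Prop :=
  ∃ d : Nat, (∀ e : Nat, e ≤ d → pvCond cs l r e) ∧ x = (l - d, r + d) ∧
    k ≤ (r + d) - (l - d) + 1

-- for a center (l = i, i ≤ r) with i < n the fuel bound n+1 is never the binding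
-- constraint: pvCond at d forces d ≤ i
theorem pvAdded_iff_bounded (cs : List Char) (k : Int) (i : Nat) (hi : i < cs.length)
    (r : Int) (_hir : (i : Int) ≤ r) (x : Int × Int) :
    (∃ d : Nat, d < cs.length + 1 ∧ (∀ e : Nat, e ≤ d → pvCond cs i r e) ∧
        x = ((i : Int) - d, r + d) ∧ k ≤ (r + d) - ((i : Int) - d) + 1) ↔
      pvAdded cs k i r x := by
  constructor
  · rintro ⟨d, _, hc, hx, hkb⟩; exact ⟨d, hc, hx, hkb⟩
  · rintro ⟨d, hc, hx, hkb⟩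
    have h0 : 0 ≤ (i : Int) - d := (hc d le_rfl).1
    exact ⟨d, by omega, hc, hx, hkb⟩

theorem pvMarks_fold (cs : List Char) (k : Int) (m : Nat) (hm : m ≤ cs.length)
    (t : List (Int × Int)) (x : Int × Int) :
    x ∈ (List.range m).foldl
        (fun t (i : Nat) => pvExpand cs k (cs.length + 1) (i : Int) ((i : Int) + 1)
          (pvExpand cs k (cs.length + 1) (i : Int) (i : Int) t)) t ↔
      x ∈ t ∨ ∃ i : Nat, i < m ∧
        (pvAdded cs k i i x ∨ pvAdded cs k i ((i : Int) + 1) x) := by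
  induction m with
  | zero => simp
  | succ m ih =>
    rw [List.range_succ, List.foldl_append, List.foldl_cons, List.foldl_nil,
      pvExpand_mem, pvExpand_mem, ih (by omega)]
    rw [pvAdded_iff_bounded cs k m (by omega) m le_rfl,
      pvAdded_iff_bounded cs k m (by omega) ((m : Int) + 1) (by omega)]
    constructor
    · intro h
      rcases h with h1 | heven
      · rcases h1 with h2 | hodd
        · rcases h2 with h | ⟨i, hi, hadd⟩
          · exact Or.inl h
          · exact Or.inr ⟨i, by omega, hadd⟩
        · exact Or.inr ⟨m, by omega, Or.inl hodd⟩
      · exact Or.inr ⟨m, by omega, Or.inr heven⟩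
    · intro h
      rcases h with h | ⟨i, hi, hadd⟩
      · exact Or.inl (Or.inl (Or.inl h))
      · rcases Nat.lt_or_ge i m with him | him
        · exact Or.inl (Or.inl (Or.inr ⟨i, him, hadd⟩))
        · have : i = m := by omega
          subst this
          rcases hadd with hodd | heven
          · exact Or.inl (Or.inr hodd)
          · exact Or.inr heven

theorem pvMarks_mem (cs : List Char) (k : Int) (x : Int × Int) :
    x ∈ pvMarks cs k ↔ ∃ i : Nat, i < cs.length ∧
      (pvAdded cs k i i x ∨ pvAdded cs k i ((i : Int) + 1) x) := by
  rw [pvMarks, pvMarks_fold cs k cs.length le_rfl]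
  simp

theorem pvMarks_spec (cs : List Char) (k : Int) (x : Int × Int) :
    x ∈ pvMarks cs k ↔ ∃ l r : Nat, x = ((l : Int), (r : Int)) ∧ l ≤ r ∧ r < cs.length ∧
      k ≤ (r : Int) - (l : Int) + 1 ∧ PvPal cs l r := by
  rw [pvMarks_mem]
  constructor
  · rintro ⟨i, hi, hadd | hadd⟩
    · obtain ⟨d, hc, hx, hkb⟩ := hadd
      have hcd := hc d le_rfl
      simp only [pvCond] at hcd
      have hdi : d ≤ i := by omega
      have hrn : i + d < cs.length := by omega
      refine ⟨i - d, i + d, ?_, by omega, hrn, by push_cast; omega, ?_⟩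
      · rw [hx, Prod.mk.injEq]
        constructor <;> push_cast <;> omega
      · intro e he
        by_cases hed : e ≤ d
        · have h3 := hc (d - e) (by omega)
          simp only [pvCond] at h3
          have e1 : ((i : Int) - ((d - e : Nat) : Int)).toNat = i - d + e := by omega
          have e2 : ((i : Int) + ((d - e : Nat) : Int)).toNat = i + d - e := by omega
          rw [e1, e2] at h3
          exact h3.2.2
        · have h3 := hc (e - d) (by omega)
          simp only [pvCond] at h3
          have e1 : ((i : Int) - ((e - d : Nat) : Int)).toNat = i + d - e := by omega
          have e2 : ((i : Int) + ((e - d : Nat) : Int)).toNat = i - d + e := by omega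
          rw [e1, e2] at h3
          exact h3.2.2.symm
    · obtain ⟨d, hc, hx, hkb⟩ := hadd
      have hcd := hc d le_rfl
      simp only [pvCond] at hcd
      have hdi : d ≤ i := by omega
      have hrn : i + 1 + d < cs.length := by omega
      refine ⟨i - d, i + 1 + d, ?_, by omega, hrn, by push_cast; omega, ?_⟩
      · rw [hx, Prod.mk.injEq]
        constructor <;> push_cast <;> omega
      · intro e he
        by_cases hed : e ≤ d
        · have h3 := hc (d - e) (by omega)
          simp only [pvCond] at h3
          have e1 : ((i : Int) - ((d - e : Nat) : Int)).toNat = i - d + e := by omega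
          have e2 : ((i : Int) + 1 + ((d - e : Nat) : Int)).toNat = i + 1 + d - e := by omega
          rw [e1, e2] at h3
          exact h3.2.2
        · have h3 := hc (e - d - 1) (by omega)
          simp only [pvCond] at h3
          have e1 : ((i : Int) - ((e - d - 1 : Nat) : Int)).toNat = i + 1 + d - e := by omega
          have e2 : ((i : Int) + 1 + ((e - d - 1 : Nat) : Int)).toNat = i - d + e := by omega
          rw [e1, e2] at h3
          exact h3.2.2.symm
  · rintro ⟨l, r, hx, hlr, hrn, hkb, hpal⟩
    have hparity : r - l = 2 * ((r - l) / 2) ∨ r - l = 2 * ((r - l) / 2) + 1 := by omega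
    set d := (r - l) / 2 with hd
    refine ⟨l + d, by omega, ?_⟩
    rcases hparity with h2 | h2
    · left
      refine ⟨d, ?_, ?_, ?_⟩
      · intro e he
        have h3 := hpal (d - e) (by omega)
        have e1 : (((l + d : Nat) : Int) - (e : Int)).toNat = l + (d - e) := by omega
        have e2 : (((l + d : Nat) : Int) + (e : Int)).toNat = r - (d - e) := by omega
        exact ⟨by push_cast; omega, by push_cast; omega, by rw [e1, e2]; exact h3⟩
      · rw [hx, Prod.mk.injEq]
        constructor <;> push_cast <;> omega
      · push_cast; omega
    · right
      refine ⟨d, ?_, ?_, ?_⟩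
      · intro e he
        have h3 := hpal (d - e) (by omega)
        have e1 : (((l + d : Nat) : Int) - (e : Int)).toNat = l + (d - e) := by omega
        have e2 : (((l + d : Nat) : Int) + 1 + (e : Int)).toNat = r - (d - e) := by omega
        exact ⟨by push_cast; omega, by push_cast; omega, by rw [e1, e2]; exact h3⟩
      · rw [hx, Prod.mk.injEq]
        constructor <;> push_cast <;> omega
      · push_cast; omega

-- ---- window = reverse  ↔  PvPal ----
theorem pvWindow_pal (cs : List Char) (a b : Nat) (hab : a < b) (hb : b ≤ cs.length) :
    ((cs.drop a).take (b - a) = ((cs.drop a).take (b - a)).reverse) ↔ PvPal cs a (b - 1) := by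
  have hlen : ((cs.drop a).take (b - a)).length = b - a := by
    simp [List.length_take, List.length_drop]
    omega
  have hget : ∀ d : Nat, (hd : d < b - a) →
      ((cs.drop a).take (b - a))[d]'(by omega) = cs[a + d]'(by omega) := by
    intro d hd
    rw [List.getElem_take, List.getElem_drop]
  constructor
  · intro h d hd
    have hdb : d < b - a := by omega
    have h1 : cs.getD (a + d) ' ' = cs[a + d]'(by omega) := List.getD_eq_getElem cs ' ' (by omega)
    have h2 : cs.getD (b - 1 - d) ' ' = cs[a + (b - a - 1 - d)]'(by omega) := by
      have : b - 1 - d = a + (b - a - 1 - d) := by omega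
      rw [this]
      exact List.getD_eq_getElem cs ' ' (by omega)
    rw [h1, h2, ← hget d hdb, ← hget (b - a - 1 - d) (by omega)]
    have h3 := List.getElem_of_eq h (show d < ((cs.drop a).take (b - a)).length by omega)
    rw [List.getElem_reverse] at h3
    rw [h3]
    congr 1
    omega
  · intro hpal
    apply List.ext_getElem (by simp)
    intro d hd _
    rw [List.getElem_reverse]
    have hdb : d < b - a := by omega
    rw [hget d hdb, hget (((cs.drop a).take (b - a)).length - 1 - d) (by omega)]
    have h1 := hpal d (by omega)
    rw [List.getD_eq_getElem cs ' ' (by omega), List.getD_eq_getElem cs ' ' (by omega)] at h1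
    convert h1 using 2
    omega

-- ---- the growing dp list ----
def pvGen (F : List Int → Nat → Int) : Nat → List Int
  | 0 => [0]
  | t + 1 => pvGen F t ++ [F (pvGen F t) (t + 1)]

theorem pvFoldl_gen (F : List Int → Nat → Int) (m : Nat) :
    (List.range m).foldl (fun dp t => dp ++ [F dp (t + 1)]) [0] = pvGen F m := by
  induction m with
  | zero => simp [pvGen]
  | succ t ih => rw [List.range_succ, List.foldl_append, ih]; simp [pvGen]

theorem pvGen_length (F : List Int → Nat → Int) (m : Nat) : (pvGen F m).length = m + 1 := by
  induction m with
  | zero => simp [pvGen]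
  | succ t ih => simp [pvGen, ih]

theorem pvGen_getD (F : List Int → Nat → Int) {j t : Nat} (h : j ≤ t) :
    (pvGen F t).getD j 0 = (pvGen F j).getD j 0 := by
  induction t with
  | zero => have : j = 0 := by omega
            subst this; rfl
  | succ t ih =>
    rcases Nat.lt_or_ge j (t + 1) with hj | hj
    · rw [pvGen, List.getD_append _ _ _ _ (by rw [pvGen_length]; omega)]
      exact ih (by omega)
    · have : j = t + 1 := by omega
      subst this; rfl

def pvVA (cs : List Char) (k : Int) (i : Nat) : Int :=
  (pvGen (pvInnerA k (pvMarks cs k)) i).getD i 0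

def pvVB (cs : List Char) (k : Int) (i : Nat) : Int :=
  (pvGen (pvStepB cs k) i).getD i 0

theorem pvGen_getD_succ (F : List Int → Nat → Int) (t : Nat) :
    (pvGen F (t + 1)).getD (t + 1) 0 = F (pvGen F t) (t + 1) := by
  rw [pvGen, List.getD_eq_getElem?_getD, List.getElem?_append_right (by rw [pvGen_length])]
  simp [pvGen_length]

theorem pvVA_succ (cs : List Char) (k : Int) (t : Nat) :
    pvVA cs k (t + 1) = pvInnerA k (pvMarks cs k) (pvGen (pvInnerA k (pvMarks cs k)) t) (t + 1) := by
  rw [pvVA, pvGen_getD_succ]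

theorem pvVA_mono (cs : List Char) (k : Int) {i j : Nat} (h : i ≤ j) :
    pvVA cs k i ≤ pvVA cs k j := by
  induction j with
  | zero => have : i = 0 := by omega
            subst this; exact le_refl _
  | succ t ih =>
    rcases Nat.lt_or_ge i (t + 1) with hi | hi
    · refine le_trans (ih (by omega)) ?_
      rw [pvVA_succ, pvInnerA]
      have hinit : (pvGen (pvInnerA k (pvMarks cs k)) t).getD (t + 1 - 1) 0 = pvVA cs k t := by
        simp [pvVA]
      rw [hinit]
      exact pvFoldMax_ge_init _ _ _
    · have : i = t + 1 := by omega
      subst this; exact le_refl _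

theorem pvVA_ge (cs : List Char) (k : Int) (hk : 1 ≤ k) {i j : Nat} (hi : 1 ≤ i)
    (hij : (j : Int) ≤ (i : Int) - k) (hm : ((j : Int), (i : Int) - 1) ∈ pvMarks cs k) :
    pvVA cs k j + 1 ≤ pvVA cs k i := by
  obtain ⟨t, rfl⟩ : ∃ t, i = t + 1 := ⟨i - 1, by omega⟩
  rw [pvVA_succ, pvInnerA]
  have hj : (pvGen (pvInnerA k (pvMarks cs k)) t).getD j 0 = pvVA cs k j := by
    rw [pvVA]; exact pvGen_getD _ (by omega)
  calc pvVA cs k j + 1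
      = (pvGen (pvInnerA k (pvMarks cs k)) t).getD j 0 + 1 := by rw [hj]
    _ ≤ _ := pvFoldMax_ge _ _ _ (List.mem_range.mpr (by omega)) hm

theorem pvPal_trim (cs : List Char) (l r : Nat) (h : PvPal cs l r) :
    PvPal cs (l + 1) (r - 1) := by
  intro d hd
  have h3 := h (d + 1) (by omega)
  have e1 : l + 1 + d = l + (d + 1) := by omega
  have e2 : r - 1 - d = r - (d + 1) := by omega
  rw [e1, e2]
  exact h3

theorem pvStepB_ge_init (cs : List Char) (k : Int) (dp : List Int) (i : Nat) :
    dp.getD (i - 1) 0 ≤ pvStepB cs k dp i := by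
  simp only [pvStepB]
  split_ifs <;> omega

theorem pvStepB_ge_k (cs : List Char) (k : Int) (dp : List Int) (i : Nat)
    (ha : k ≤ (i : Int))
    (hw : PySem.List.slice cs (some ((i : Int) - k)) (some (i : Int)) =
      (PySem.List.slice cs (some ((i : Int) - k)) (some (i : Int))).reverse) :
    dp.getD ((i : Int) - k).toNat 0 + 1 ≤ pvStepB cs k dp i := by
  simp only [pvStepB]
  split_ifs <;> first | contradiction | omega

theorem pvStepB_ge_k1 (cs : List Char) (k : Int) (dp : List Int) (i : Nat)
    (ha : k + 1 ≤ (i : Int))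
    (hw : PySem.List.slice cs (some ((i : Int) - k - 1)) (some (i : Int)) =
      (PySem.List.slice cs (some ((i : Int) - k - 1)) (some (i : Int))).reverse) :
    dp.getD ((i : Int) - k - 1).toNat 0 + 1 ≤ pvStepB cs k dp i := by
  simp only [pvStepB]
  split_ifs <;> first | contradiction | omega

theorem pvStepB_le (cs : List Char) (k : Int) (dp : List Int) (i : Nat) (X : Int)
    (h0 : dp.getD (i - 1) 0 ≤ X)
    (h1 : k ≤ (i : Int) →
      PySem.List.slice cs (some ((i : Int) - k)) (some (i : Int)) =
        (PySem.List.slice cs (some ((i : Int) - k)) (some (i : Int))).reverse →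
      dp.getD ((i : Int) - k).toNat 0 + 1 ≤ X)
    (h2 : k + 1 ≤ (i : Int) →
      PySem.List.slice cs (some ((i : Int) - k - 1)) (some (i : Int)) =
        (PySem.List.slice cs (some ((i : Int) - k - 1)) (some (i : Int))).reverse →
      dp.getD ((i : Int) - k - 1).toNat 0 + 1 ≤ X) :
    pvStepB cs k dp i ≤ X := by
  simp only [pvStepB]
  split_ifs with c1 c2 c3 c4 c5 c6 c7 c8
  all_goals try (have := h1 ‹k ≤ (i : Int)› ‹_›)
  all_goals try (have := h2 ‹k + 1 ≤ (i : Int)› ‹_›)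
  all_goals omega

theorem pvStep_eq (cs : List Char) (k : Int) (hk : 1 ≤ k) {i : Nat} (h1 : 1 ≤ i)
    (hin : i ≤ cs.length) :
    pvInnerA k (pvMarks cs k) (pvGen (pvInnerA k (pvMarks cs k)) (i - 1)) i
      = pvStepB cs k (pvGen (pvInnerA k (pvMarks cs k)) (i - 1)) i := by
  set G := pvGen (pvInnerA k (pvMarks cs k)) (i - 1) with hG
  have hGj : ∀ j : Nat, j ≤ i - 1 → G.getD j 0 = pvVA cs k j := by
    intro j hj
    rw [hG, pvVA]
    exact pvGen_getD _ hj
  have hinit : G.getD (i - 1) 0 = pvVA cs k (i - 1) := hGj _ le_rfl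
  apply le_antisymm
  · rw [pvInnerA]
    apply pvFoldMax_le
    · exact pvStepB_ge_init cs k G i
    · intro j hj hq
      have hjr : (j : Int) ≤ (i : Int) - k := by
        have := List.mem_range.mp hj
        omega
      obtain ⟨l, r, hx, hlr, hrn, hkb, hpal⟩ := (pvMarks_spec cs k _).mp hq
      have hjl : l = j := by
        have := congrArg Prod.fst hx
        simp at this
        omega
      have hir : r = i - 1 := by
        have := congrArg Prod.snd hx
        simp at this
        omega
      subst hir
      rw [hjl] at hkb hpal
      have hcase : (j : Int) = (i : Int) - k ∨ (j : Int) = (i : Int) - k - 1 ∨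
          (j : Int) ≤ (i : Int) - k - 2 := by omega
      rcases hcase with hcase | hcase | hcase
      · have hij : ((i : Int) - k).toNat = j := by omega
        have hwin : PySem.List.slice cs (some ((i : Int) - k)) (some (i : Int)) =
            (PySem.List.slice cs (some ((i : Int) - k)) (some (i : Int))).reverse := by
          rw [PySem.List.slice_toNat _ (by omega) (by omega), hij, Int.toNat_natCast]
          exact (pvWindow_pal cs j i (by omega) hin).mpr hpal
        have := pvStepB_ge_k cs k G i (by omega) hwin
        rw [hij] at this
        exact this
      · have hij : ((i : Int) - k - 1).toNat = j := by omega
        have hwin : PySem.List.slice cs (some ((i : Int) - k - 1)) (some (i : Int)) =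
            (PySem.List.slice cs (some ((i : Int) - k - 1)) (some (i : Int))).reverse := by
          rw [PySem.List.slice_toNat _ (by omega) (by omega), hij, Int.toNat_natCast]
          exact (pvWindow_pal cs j i (by omega) hin).mpr hpal
        have := pvStepB_ge_k1 cs k G i (by omega) hwin
        rw [hij] at this
        exact this
      · have hjv : G.getD j 0 = pvVA cs k j := hGj j (by omega)
        have hkey : pvVA cs k (j + 1) + 1 ≤ pvVA cs k (i - 1) := by
          apply pvVA_ge cs k hk (by omega) (by push_cast; omega)
          apply (pvMarks_spec cs k _).mpr
          refine ⟨j + 1, i - 2, ?_, by omega, by omega, by push_cast; omega, ?_⟩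
          · rw [Prod.mk.injEq]
            constructor <;> push_cast <;> omega
          · have htrim := pvPal_trim cs j (i - 1) hpal
            have e : i - 1 - 1 = i - 2 := by omega
            rw [e] at htrim
            exact htrim
        have hmono : pvVA cs k j ≤ pvVA cs k (j + 1) := pvVA_mono cs k (by omega)
        have hbase := pvStepB_ge_init cs k G i
        rw [hinit] at hbase
        rw [hjv]
        omega
  · rw [pvInnerA]
    apply pvStepB_le
    · exact pvFoldMax_ge_init _ _ _
    · intro hki hw
      set j := ((i : Int) - k).toNat with hj
      have hji : (j : Int) = (i : Int) - k := by omega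
      have hpal : PvPal cs j (i - 1) := by
        rw [PySem.List.slice_toNat _ (by omega) (by omega), Int.toNat_natCast] at hw
        exact (pvWindow_pal cs j i (by omega) hin).mp hw
      apply pvFoldMax_ge _ _ _ (List.mem_range.mpr (by omega))
      apply (pvMarks_spec cs k _).mpr
      refine ⟨j, i - 1, ?_, by omega, by omega, by omega, hpal⟩
      rw [Prod.mk.injEq]
      constructor <;> omega
    · intro hki hw
      set j := ((i : Int) - k - 1).toNat with hj
      have hji : (j : Int) = (i : Int) - k - 1 := by omega
      have hpal : PvPal cs j (i - 1) := by
        rw [PySem.List.slice_toNat _ (by omega) (by omega), Int.toNat_natCast] at hw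
        exact (pvWindow_pal cs j i (by omega) hin).mp hw
      apply pvFoldMax_ge _ _ _ (List.mem_range.mpr (by omega))
      apply (pvMarks_spec cs k _).mpr
      refine ⟨j, i - 1, ?_, by omega, by omega, by omega, hpal⟩
      rw [Prod.mk.injEq]
      constructor <;> omega

theorem pvGen_eq (cs : List Char) (k : Int) (hk : 1 ≤ k) {t : Nat} (ht : t ≤ cs.length) :
    pvGen (pvInnerA k (pvMarks cs k)) t = pvGen (pvStepB cs k) t := by
  induction t with
  | zero => rfl
  | succ t ih =>
    have ih' := ih (by omega)
    rw [pvGen, pvGen, ← ih']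
    congr 1
    have := pvStep_eq cs k hk (i := t + 1) (by omega) (by omega)
    simpa using this

theorem pvGen_pyGetD_last (F : List Int → Nat → Int) (m : Nat) :
    PySem.List.pyGetD (pvGen F m) (-1) 0 = (pvGen F m).getD m 0 := by
  cases m with
  | zero => rfl
  | succ t =>
    rw [pvGen_getD_succ]
    rw [pvGen, PySem.List.pyGetD_neg_one_append_singleton]

-- ===== VERDICT (by name: the statement is the Claim_ definition above) =====
theorem maxPalindromes1_spec : Claim_equal_maxPalindromes1 := by
  unfold Claim_equal_maxPalindromes1
  intro s k _ hpre
  unfold Spec_maxPalindromes1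
  simp only [maxPalindromes1, maxPalindromes1_alt]
  rw [pvFoldl_gen, pvFoldl_gen, pvGen_pyGetD_last]
  rcases hpre with hk | hn
  · rw [pvGen_eq s.toList k hk le_rfl]
  · rw [hn]
    rfl
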